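-- pv_equiv track=rewrite | github.com/isabella232/osis-internship | views/score.py | _retrieve_blank_periods_by_student
-- ===== SOURCE A (Python) =====
-- def _retrieve_blank_periods_by_student(periods, scores):
--     students = {}
--     for student, period in scores:
--         if student not in students.keys():
--             students[student] = []
--         students[student].append(period)
--     for student in students.keys():
--         students[student] = [period for period in periods if period not in students[student]]
--     return students
-- ===== SOURCE B (Python) =====
-- def _retrieve_blank_periods_by_student(periods, scores):
--     students = {}
--     for student, period in scores:
--         if student not in students:
--             students[student] = list(periods)
--         students[student] = [p for p in students[student] if p != period]
--     return students
-- ===== Notes on version B (the rewrite author's own statement) =====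
-- stated objective: alternative
-- what changed: Single pass over scores that seeds each new student with the full period list and crosses off each scored period by filtering, instead of A's two passes (collect scored periods per student, then recompute each entry by set difference against periods).
import Mathlib
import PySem

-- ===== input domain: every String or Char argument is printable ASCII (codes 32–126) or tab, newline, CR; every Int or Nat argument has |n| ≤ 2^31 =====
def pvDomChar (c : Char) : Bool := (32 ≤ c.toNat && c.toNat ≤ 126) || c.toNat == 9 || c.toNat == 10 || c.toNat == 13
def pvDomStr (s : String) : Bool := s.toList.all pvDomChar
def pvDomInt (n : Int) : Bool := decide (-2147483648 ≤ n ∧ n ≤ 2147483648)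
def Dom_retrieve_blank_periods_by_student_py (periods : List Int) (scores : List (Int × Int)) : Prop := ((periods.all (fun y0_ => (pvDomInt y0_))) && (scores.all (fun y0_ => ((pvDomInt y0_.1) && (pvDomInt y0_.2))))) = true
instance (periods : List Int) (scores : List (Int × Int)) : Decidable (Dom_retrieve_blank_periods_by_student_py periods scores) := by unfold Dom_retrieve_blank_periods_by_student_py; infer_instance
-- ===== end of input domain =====

-- B replaces A's two-pass build-then-set-difference with a single pass that starts each
-- student at the full period list and crosses off each scored period (objective: alternative).


-- ===== PORT A =====
-- association-list dict helpers (Python dict semantics: lookup = first match,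
-- assignment overwrites in place, new keys append; exact for these uses)
def alContains (l : List (Int × List Int)) (k : Int) : Bool := l.any (fun kv => kv.1 == k)
def alGet (l : List (Int × List Int)) (k : Int) : List Int := ((l.find? (fun kv => kv.1 == k)).map (fun kv => kv.2)).getD []
def alSet (l : List (Int × List Int)) (k : Int) (v : List Int) : List (Int × List Int) :=
  if alContains l k then l.map (fun kv => if kv.1 == k then (k, v) else kv) else l ++ [(k, v)]

-- one iteration of A's first loop: ensure key, then append the period
def aStep (d : List (Int × List Int)) (sp : Int × Int) : List (Int × List Int) :=
  let d' := if alContains d sp.1 then d else alSet d sp.1 []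
  alSet d' sp.1 (alGet d' sp.1 ++ [sp.2])

-- one iteration of A's second loop: students[k] = [p for p in periods if p not in students[k]]
def aAssign (periods : List Int) (d : List (Int × List Int)) (k : Int) : List (Int × List Int) :=
  alSet d k (periods.filter (fun p => !((alGet d k).contains p)))

def retrieve_blank_periods_by_student_py (periods : List Int) (scores : List (Int × Int)) : List (Int × List Int) :=
  let students := scores.foldl aStep []
  (students.map (fun kv => kv.1)).foldl (aAssign periods) students

-- ===== PORT B =====
-- one iteration of B's single pass: first sight seeds the full period list,
-- then the scored period is crossed off by filtering
def bStep (periods : List Int) (d : List (Int × List Int)) (sp : Int × Int) : List (Int × List Int) :=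
  let d' := if alContains d sp.1 then d else alSet d sp.1 periods
  alSet d' sp.1 ((alGet d' sp.1).filter (fun q => !(q == sp.2)))

def retrieve_blank_periods_by_student_py_alt (periods : List Int) (scores : List (Int × Int)) : List (Int × List Int) :=
  scores.foldl (bStep periods) []

-- ===== PRECONDITION & SPEC =====
def Spec_retrieve_blank_periods_by_student_py (periods : List Int) (scores : List (Int × Int)) (out : List (Int × List Int)) : Prop := out = retrieve_blank_periods_by_student_py_alt periods scores
instance (periods : List Int) (scores : List (Int × Int)) (out : List (Int × List Int)) : Decidable (Spec_retrieve_blank_periods_by_student_py periods scores out) := by unfold Spec_retrieve_blank_periods_by_student_py; infer_instance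

-- ===== CLAIM (what is proved, stated in full; the proofs are below) =====
def Claim_equal_retrieve_blank_periods_by_student_py : Prop := ∀ (periods : List Int) (scores : List (Int × Int)), Dom_retrieve_blank_periods_by_student_py periods scores → Spec_retrieve_blank_periods_by_student_py periods scores (retrieve_blank_periods_by_student_py periods scores)


-- ===== LEMMAS AND PROOFS =====

-- proof-only helpers
def keysOf (l : List (Int × List Int)) : List Int := l.map (fun kv => kv.1)

def gmap (P : List Int) (kv : Int × List Int) : Int × List Int :=
  (kv.1, P.filter (fun x => !(kv.2.contains x)))

theorem alContains_false_iff (l : List (Int × List Int)) (k : Int) :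
    alContains l k = false ↔ ∀ kv ∈ l, kv.1 ≠ k := by
  simp [alContains]

theorem alContains_true_iff (l : List (Int × List Int)) (k : Int) :
    alContains l k = true ↔ k ∈ keysOf l := by
  unfold alContains keysOf
  constructor
  · intro h
    rcases List.any_eq_true.mp h with ⟨kv, hm, hk⟩
    exact List.mem_map.mpr ⟨kv, hm, by simpa using hk⟩
  · intro h
    rcases List.mem_map.mp h with ⟨kv, hm, hk⟩
    exact List.any_eq_true.mpr ⟨kv, hm, by simp [hk]⟩

theorem keysOf_append (l m : List (Int × List Int)) :
    keysOf (l ++ m) = keysOf l ++ keysOf m := by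
  simp [keysOf]

theorem alGet_append_left (l m : List (Int × List Int)) (k : Int)
    (h : ∀ kv ∈ l, kv.1 ≠ k) : alGet (l ++ m) k = alGet m k := by
  have hfind : l.find? (fun kv => kv.1 == k) = none := by
    rw [List.find?_eq_none]
    intro kv hkv
    simpa using h kv hkv
  simp [alGet, List.find?_append, hfind]

theorem alGet_cons_self (k : Int) (v : List Int) (m : List (Int × List Int)) :
    alGet ((k, v) :: m) k = v := by
  simp [alGet]

theorem map_upd_noop (l : List (Int × List Int)) (k : Int) (v : List Int)
    (h : ∀ kv ∈ l, kv.1 ≠ k) :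
    l.map (fun kv => if kv.1 == k then (k, v) else kv) = l := by
  have hmap : l.map (fun kv => if kv.1 == k then (k, v) else kv) = l.map id :=
    List.map_congr_left (by intro kv hkv; simp [h kv hkv])
  simpa using hmap

theorem mem_val_eq_alGet (d : List (Int × List Int)) (k : Int)
    (hnd : (keysOf d).Nodup) (kv : Int × List Int) (hmem : kv ∈ d) (hk : kv.1 = k) :
    kv.2 = alGet d k := by
  induction d with
  | nil => simp at hmem
  | cons a t ih =>
    have hnd2 := List.nodup_cons.mp (show (a.1 :: keysOf t).Nodup from hnd)
    rcases List.mem_cons.mp hmem with rfl | htl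
    · simp [alGet, hk]
    · have hmemk : kv.1 ∈ keysOf t := List.mem_map.mpr ⟨kv, htl, rfl⟩
      have hne : a.1 ≠ k := by
        intro hak
        exact hnd2.1 (by rw [hak, ← hk]; exact hmemk)
      rw [ih hnd2.2 htl]
      simp [alGet, hne]

theorem find?_map_gmap (P : List Int) (l : List (Int × List Int)) (k : Int) :
    (l.map (gmap P)).find? (fun kv => kv.1 == k)
      = (l.find? (fun kv => kv.1 == k)).map (gmap P) := by
  rw [List.find?_map]
  congr 1

theorem alContains_map_gmap (P : List Int) (l : List (Int × List Int)) (k : Int) :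
    alContains (l.map (gmap P)) k = alContains l k := by
  unfold alContains
  rw [List.any_map]
  exact congrArg (List.any l) (funext fun kv => by simp [Function.comp, gmap])

theorem alGet_map_gmap (P : List Int) (l : List (Int × List Int)) (k : Int)
    (h : alContains l k = true) :
    alGet (l.map (gmap P)) k = P.filter (fun x => !((alGet l k).contains x)) := by
  rcases hh : l.find? (fun kv => kv.1 == k) with _ | kv
  · exfalso
    rw [List.find?_eq_none] at hh
    rcases (by simpa [alContains] using h : ∃ kv ∈ l, kv.1 = k) with ⟨kv, hm, hk⟩
    exact hh kv hm (by simp [hk])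
  · have hmg := find?_map_gmap P l k
    rw [hh] at hmg
    have hget : alGet l k = kv.2 := by simp [alGet, hh]
    rw [alGet, hmg, hget]
    rfl

theorem gval_append (P v : List Int) (p : Int) :
    P.filter (fun x => !((v ++ [p]).contains x))
      = (P.filter (fun x => !(v.contains x))).filter (fun q => !(q == p)) := by
  rw [List.filter_filter]
  apply List.filter_congr
  intro x _
  by_cases hxp : x = p <;> by_cases hxv : x ∈ v <;> simp [hxp, hxv]

theorem keysOf_alSet_of_contains (d : List (Int × List Int)) (k : Int) (v : List Int)
    (h : alContains d k = true) : keysOf (alSet d k v) = keysOf d := by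
  simp only [alSet, h, if_pos]
  simp only [keysOf, List.map_map]
  apply List.map_congr_left
  intro kv _
  by_cases hk : kv.1 = k <;> simp [hk]

theorem nodup_keys_aStep (d : List (Int × List Int)) (sp : Int × Int)
    (hnd : (keysOf d).Nodup) : (keysOf (aStep d sp)).Nodup := by
  by_cases h : alContains d sp.1 = true
  · have h2 : alContains d sp.1 = true := h
    simp only [aStep, h, if_pos]
    rw [keysOf_alSet_of_contains _ _ _ h2]
    exact hnd
  · have hfalse : alContains d sp.1 = false := by simpa using h
    have hnot : sp.1 ∉ keysOf d := by
      intro hmem; exact absurd ((alContains_true_iff d sp.1).mpr hmem) (by simp [hfalse])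
    simp only [aStep, hfalse, if_neg, Bool.false_eq_true, not_false_iff]
    have hset : alSet d sp.1 [] = d ++ [(sp.1, [])] := by
      simp [alSet, hfalse]
    rw [hset]
    have hc : alContains (d ++ [(sp.1, [])]) sp.1 = true := by
      rw [alContains_true_iff, keysOf_append]; simp [keysOf]
    rw [keysOf_alSet_of_contains _ _ _ hc, keysOf_append]
    rw [List.nodup_append]
    refine ⟨hnd, by simp [keysOf], ?_⟩
    intro a ha b hb
    have hb' : b = sp.1 := by simpa [keysOf] using hb
    subst hb'
    intro hab
    subst hab
    exact hnot ha

-- A's first-loop step commutes (through gmap) with B's single-pass step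
theorem step_comm (P : List Int) (d : List (Int × List Int)) (sp : Int × Int)
    (hnd : (keysOf d).Nodup) :
    bStep P (d.map (gmap P)) sp = (aStep d sp).map (gmap P) := by
  by_cases h : alContains d sp.1 = true
  · have hB : alContains (d.map (gmap P)) sp.1 = true := by
      rw [alContains_map_gmap]; exact h
    simp only [bStep, aStep, hB, h, if_pos]
    rw [alGet_map_gmap P d sp.1 h]
    have hcA : alContains d sp.1 = true := h
    have hcB : alContains (d.map (gmap P)) sp.1 = true := hB
    simp only [alSet, hcA, hcB, if_pos, List.map_map]
    apply List.map_congr_left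
    intro kv hkv
    by_cases hk : kv.1 = sp.1
    · have hv : kv.2 = alGet d sp.1 := mem_val_eq_alGet d sp.1 hnd kv hkv hk
      simp only [Function.comp, gmap, hk, hv, beq_self_eq_true, if_true, gval_append]
    · simp [Function.comp, gmap, hk]
  · have hfalse : alContains d sp.1 = false := by simpa using h
    have hBfalse : alContains (d.map (gmap P)) sp.1 = false := by
      rw [alContains_map_gmap]; exact hfalse
    have hkeys : ∀ kv ∈ d, kv.1 ≠ sp.1 := (alContains_false_iff d sp.1).mp hfalse
    have hkeysB : ∀ kv ∈ d.map (gmap P), kv.1 ≠ sp.1 := by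
      intro kv hkv
      rcases List.mem_map.mp hkv with ⟨kw, hkw, rfl⟩
      simpa [gmap] using hkeys kw hkw
    simp only [bStep, aStep, hfalse, hBfalse, Bool.false_eq_true, if_neg, not_false_iff]
    have hsetA : alSet d sp.1 [] = d ++ [(sp.1, [])] := by simp [alSet, hfalse]
    have hsetB : alSet (d.map (gmap P)) sp.1 P = d.map (gmap P) ++ [(sp.1, P)] := by
      simp [alSet, hBfalse]
    rw [hsetA, hsetB]
    rw [alGet_append_left d _ sp.1 hkeys, alGet_append_left (d.map (gmap P)) _ sp.1 hkeysB]
    rw [alGet_cons_self, alGet_cons_self]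
    have hcA : alContains (d ++ [(sp.1, [])]) sp.1 = true := by
      rw [alContains_true_iff, keysOf_append]; simp [keysOf]
    have hcB : alContains (d.map (gmap P) ++ [(sp.1, P)]) sp.1 = true := by
      rw [alContains_true_iff, keysOf_append]; simp [keysOf]
    simp only [alSet, hcA, hcB, if_pos, List.map_append]
    rw [map_upd_noop d _ _ hkeys, map_upd_noop (d.map (gmap P)) _ _ hkeysB]
    simp [gmap]
    apply List.filter_congr
    intro x _
    by_cases h1 : x = sp.2 <;> simp [h1]

theorem fold_comm (P : List Int) (scores : List (Int × Int)) :
    ∀ d : List (Int × List Int), (keysOf d).Nodup →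
      scores.foldl (bStep P) (d.map (gmap P)) = (scores.foldl aStep d).map (gmap P) := by
  induction scores with
  | nil => intro d _; simp
  | cons sp rest ih =>
    intro d hnd
    simp only [List.foldl_cons]
    rw [step_comm P d sp hnd]
    exact ih (aStep d sp) (nodup_keys_aStep d sp hnd)

-- A's second loop rewrites each entry's value exactly once: it is map (gmap P)
theorem assign_fold_aux (P : List Int) :
    ∀ (todo done : List (Int × List Int)), (keysOf (done ++ todo)).Nodup →
      (todo.map (fun kv => kv.1)).foldl (aAssign P) (done.map (gmap P) ++ todo)
        = (done ++ todo).map (gmap P) := by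
  intro todo
  induction todo with
  | nil => intro done _; simp
  | cons kv rest ih =>
    intro done hnd
    obtain ⟨k, v⟩ := kv
    have hnd' : (keysOf done ++ (k :: keysOf rest)).Nodup := by
      simpa [keysOf_append, keysOf] using hnd
    have hkdone : ∀ kw ∈ done, kw.1 ≠ k := by
      intro kw hkw hkk
      have h1 : k ∈ keysOf done := List.mem_map.mpr ⟨kw, hkw, hkk⟩
      exact (List.nodup_append.mp hnd').2.2 k h1 k (by simp) rfl
    have hkrest : ∀ kw ∈ rest, kw.1 ≠ k := by
      intro kw hkw hkk
      have h1 : k ∈ keysOf rest := List.mem_map.mpr ⟨kw, hkw, hkk⟩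
      have h2 := (List.nodup_append.mp hnd').2.1
      exact (List.nodup_cons.mp h2).1 h1
    have hkdoneG : ∀ kw ∈ done.map (gmap P), kw.1 ≠ k := by
      intro kw hkw
      rcases List.mem_map.mp hkw with ⟨kw', hkw', rfl⟩
      simpa [gmap] using hkdone kw' hkw'
    simp only [List.map_cons, List.foldl_cons]
    have hstep : aAssign P (done.map (gmap P) ++ (k, v) :: rest) k
        = (done ++ [(k, v)]).map (gmap P) ++ rest := by
      have hget : alGet (done.map (gmap P) ++ (k, v) :: rest) k = v := by
        rw [alGet_append_left _ _ _ hkdoneG, alGet_cons_self]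
      have hc : alContains (done.map (gmap P) ++ (k, v) :: rest) k = true := by
        rw [alContains_true_iff, keysOf_append]; simp [keysOf]
      simp only [aAssign, hget, alSet, hc, if_pos, List.map_append, List.map_cons]
      rw [map_upd_noop _ _ _ hkdoneG, map_upd_noop rest _ _ hkrest]
      simp [gmap]
    rw [hstep]
    have hnd2 : (keysOf ((done ++ [(k, v)]) ++ rest)).Nodup := by
      simpa [keysOf_append, keysOf] using hnd
    have := ih (done ++ [(k, v)]) hnd2
    rw [this]
    simp

theorem nodup_keys_fold (scores : List (Int × Int)) :
    ∀ d : List (Int × List Int), (keysOf d).Nodup →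
      (keysOf (scores.foldl aStep d)).Nodup := by
  induction scores with
  | nil => intro d hnd; simpa using hnd
  | cons sp rest ih =>
    intro d hnd
    exact ih (aStep d sp) (nodup_keys_aStep d sp hnd)

-- ===== VERDICT (by name: the statement is the Claim_ definition above) =====
theorem retrieve_blank_periods_by_student_py_spec : Claim_equal_retrieve_blank_periods_by_student_py := by
  intro periods scores _
  unfold Spec_retrieve_blank_periods_by_student_py
  unfold retrieve_blank_periods_by_student_py retrieve_blank_periods_by_student_py_alt
  have hnd : (keysOf (scores.foldl aStep [])).Nodup := nodup_keys_fold scores [] (by simp [keysOf])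
  have h2 := assign_fold_aux periods (scores.foldl aStep []) [] (by simpa using hnd)
  simp only [List.map_nil, List.nil_append] at h2
  rw [h2]
  have h1 := fold_comm periods scores [] (by simp [keysOf])
  simpa using h1.symm
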